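-- pv_equiv track=rewrite | github.com/cinderblock/balls-counter | scripts/test_motion_ring.py | compare_events
-- ===== SOURCE A (Python) =====
-- def compare_events(events, ground_truth, tolerance_frames=15):
--     detected_frames = []
--     for frame, n_balls, peak in events:
--         for _ in range(n_balls):
--             detected_frames.append(frame)
--
--     gt = sorted(ground_truth)
--     det = sorted(detected_frames)
--
--     matched_gt = set()
--     matched_det = set()
--
--     for di, df in enumerate(det):
--         best_dist = tolerance_frames + 1
--         best_gi = -1
--         for gi, gf in enumerate(gt):
--             if gi in matched_gt:
--                 continue
--             dist = abs(df - gf)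
--             if dist < best_dist:
--                 best_dist = dist
--                 best_gi = gi
--         if best_gi >= 0 and best_dist <= tolerance_frames:
--             matched_gt.add(best_gi)
--             matched_det.add(di)
--
--     missed = [gt[i] for i in range(len(gt)) if i not in matched_gt]
--     false_pos = [det[i] for i in range(len(det)) if i not in matched_det]
--     return len(matched_gt), missed, false_pos
-- ===== SOURCE B (Python) =====
-- def compare_events(events, ground_truth, tolerance_frames=15):
--     # Two-pointer sweep over both sorted lists: for each detection the nearest
--     # unmatched ground-truth frame is one of its two sorted neighbours.
--     det = []
--     for frame, n_balls, peak in events: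
--         det.extend([frame] * n_balls)
--     det.sort()
--     gt = sorted(ground_truth)
--
--     left = []          # unmatched gt values already passed (increasing stack)
--     i = 0              # gt[i:] not yet passed
--     matched = 0
--     false_pos = []
--     for df in det:
--         while i < len(gt) and gt[i] < df:
--             left.append(gt[i])
--             i += 1
--         dl = df - left[-1] if left else None
--         dr = gt[i] - df if i < len(gt) else None
--         if dl is not None and dl <= tolerance_frames and (dr is None or dl <= dr):
--             left.pop()
--             matched += 1
--         elif dr is not None and dr <= tolerance_frames:
--             i += 1
--             matched += 1
--         else:
--             false_pos.append(df)
--     missed = left + gt[i:]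
--     return matched, missed, false_pos
-- ===== Notes on version B (the rewrite author's own statement) =====
-- stated objective: faster
-- what changed: A rescans every ground-truth frame (skipping a matched-index set) for each detection; B does one two-pointer sweep over the two sorted lists, keeping passed unmatched ground-truth values on a stack so each detection is compared only with its two sorted neighbours.
import Mathlib
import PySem

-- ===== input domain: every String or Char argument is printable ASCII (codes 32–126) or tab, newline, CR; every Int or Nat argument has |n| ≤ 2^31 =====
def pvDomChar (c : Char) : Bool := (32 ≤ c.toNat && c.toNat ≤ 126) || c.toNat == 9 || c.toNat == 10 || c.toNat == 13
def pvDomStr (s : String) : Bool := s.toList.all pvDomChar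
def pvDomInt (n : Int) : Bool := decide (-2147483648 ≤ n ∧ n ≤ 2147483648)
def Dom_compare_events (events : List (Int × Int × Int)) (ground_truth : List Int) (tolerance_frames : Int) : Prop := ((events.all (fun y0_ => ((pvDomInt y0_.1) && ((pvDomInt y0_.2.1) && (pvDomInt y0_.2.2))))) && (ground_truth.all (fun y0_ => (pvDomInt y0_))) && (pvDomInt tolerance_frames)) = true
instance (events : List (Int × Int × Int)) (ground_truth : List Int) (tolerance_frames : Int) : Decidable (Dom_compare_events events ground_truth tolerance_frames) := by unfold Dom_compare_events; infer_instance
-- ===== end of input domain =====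

-- B replaces A's quadratic rescan of all ground-truth frames per detection by a
-- single two-pointer sweep over the two sorted lists (nearest unmatched gt frame
-- is always one of the two sorted neighbours); objective: faster.

-- ===== PORT A =====
-- inner loop: for gi, gf in enumerate(gt): skip matched; keep strictly best
def pvAInner (gt : List Int) (mg : PySem.Set Int) (df tol : Int) : Int × Int :=
  (PySem.List.enumerate gt).foldl (fun b q =>
    if PySem.Set.contains mg q.1 then b
    else if |df - q.2| < b.1 then (|df - q.2|, q.1) else b) (tol + 1, -1)

def pvAStep (gt : List Int) (tol : Int) (st : PySem.Set Int × PySem.Set Int) (p : Int × Int) : PySem.Set Int × PySem.Set Int :=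
  let best := pvAInner gt st.1 p.2 tol
  if best.2 ≥ 0 ∧ best.1 ≤ tol then (PySem.Set.add st.1 best.2, PySem.Set.add st.2 p.1) else st

def compare_events (events : List (Int × Int × Int)) (ground_truth : List Int) (tolerance_frames : Int) : Int × List Int × List Int :=
  let detected_frames : List Int := events.foldl (fun acc e =>
    (PySem.List.pyRange 0 e.2.1 1).foldl (fun a _ => a ++ [e.1]) acc) []
  let gt := PySem.List.sorted ground_truth (fun x => x) false
  let det := PySem.List.sorted detected_frames (fun x => x) false
  let st := (PySem.List.enumerate det).foldl (pvAStep gt tolerance_frames) ([], [])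
  let missed := ((PySem.List.pyRange 0 gt.length 1).filter (fun i => ! PySem.Set.contains st.1 i)).map (fun i => PySem.List.pyGetD gt i 0)
  let false_pos := ((PySem.List.pyRange 0 det.length 1).filter (fun i => ! PySem.Set.contains st.2 i)).map (fun i => PySem.List.pyGetD det i 0)
  ((st.1.length : Int), missed, false_pos)

-- ===== PORT B =====
-- the 'while i < len(gt) and gt[i] < df' loop
def pvAdvance (gt : List Int) (df : Int) (left : List Int) (i : Nat) : List Int × Nat :=
  if h : i < gt.length then
    if gt[i] < df then pvAdvance gt df (left ++ [gt[i]]) (i + 1) else (left, i)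
  else (left, i)
termination_by gt.length - i

def pvBStep (gt : List Int) (tol : Int) (st : List Int × Nat × Int × List Int) (df : Int) : List Int × Nat × Int × List Int :=
  let a := pvAdvance gt df st.1 st.2.1
  let left := a.1
  let i := a.2
  let matched := st.2.2.1
  let fp := st.2.2.2
  let dl? : Option Int := left.getLast?.map (fun v => df - v)
  let dr? : Option Int := if h : i < gt.length then some (gt[i] - df) else none
  let takeL : Bool := match dl?, dr? with
    | some dl, none => decide (dl ≤ tol)
    | some dl, some dr => decide (dl ≤ tol ∧ dl ≤ dr)
    | none, _ => false
  if takeL then (left.dropLast, i, matched + 1, fp)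
  else match dr? with
    | some dr => if dr ≤ tol then (left, i + 1, matched + 1, fp)
                 else (left, i, matched, fp ++ [df])
    | none => (left, i, matched, fp ++ [df])

def compare_events_alt (events : List (Int × Int × Int)) (ground_truth : List Int) (tolerance_frames : Int) : Int × List Int × List Int :=
  let det0 : List Int := events.foldl (fun acc e => acc ++ List.replicate e.2.1.toNat e.1) []
  let det := PySem.List.sorted det0 (fun x => x) false
  let gt := PySem.List.sorted ground_truth (fun x => x) false
  let st := det.foldl (pvBStep gt tolerance_frames) ([], 0, 0, [])
  (st.2.2.1, st.1 ++ gt.drop st.2.1, st.2.2.2)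

-- ===== PRECONDITION & SPEC =====
def Spec_compare_events (events : List (Int × Int × Int)) (ground_truth : List Int) (tolerance_frames : Int) (out : Int × List Int × List Int) : Prop := out = compare_events_alt events ground_truth tolerance_frames
instance (events : List (Int × Int × Int)) (ground_truth : List Int) (tolerance_frames : Int) (out : Int × List Int × List Int) : Decidable (Spec_compare_events events ground_truth tolerance_frames out) := by unfold Spec_compare_events; infer_instance

-- ===== CLAIM (what is proved, stated in full; the proofs are below) =====
def Claim_equal_compare_events : Prop := ∀ (events : List (Int × Int × Int)) (ground_truth : List Int) (tolerance_frames : Int), Dom_compare_events events ground_truth tolerance_frames → Spec_compare_events events ground_truth tolerance_frames (compare_events events ground_truth tolerance_frames)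

-- ===== LEMMAS AND PROOFS =====

-- distance of a detection df to an (index, value) pair, and A's strict-improvement scan step
def pvDist (df : Int) (q : Int × Int) : Int := |df - q.2|

def pvG (df : Int) (b q : Int × Int) : Int × Int :=
  if pvDist df q < b.1 then (pvDist df q, q.1) else b

-- the unmatched (index, value) pairs of gt under matched-set mg
def pvU (gt : List Int) (mg : PySem.Set Int) : List (Int × Int) :=
  (PySem.List.enumerate gt).filter (fun q => ! PySem.Set.contains mg q.1)

-- coupling invariant: the unmatched pairs split into B's left stack (indices < i) and the untouched tail gt[i:]
def pvInvL (gt : List Int) (mg : PySem.Set Int) (left : List Int) (i : Nat) (P : List (Int × Int)) : Prop :=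
  i ≤ gt.length ∧
  pvU gt mg = P ++ PySem.List.enumerate (gt.drop i) (i : Int) ∧
  P.map (·.2) = left ∧
  (∀ q ∈ P, q.1 < (i : Int))

lemma pvSkipFold (mg : PySem.Set Int) (df : Int) :
    ∀ (l : List (Int × Int)) (b : Int × Int),
      l.foldl (fun b q => if PySem.Set.contains mg q.1 then b
        else if |df - q.2| < b.1 then (|df - q.2|, q.1) else b) b
      = (l.filter (fun q => ! PySem.Set.contains mg q.1)).foldl (pvG df) b := by
  intro l
  induction l with
  | nil => intro b; rfl
  | cons q l ih =>
    intro b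
    by_cases h : PySem.Set.contains mg q.1
    · simp only [List.foldl_cons, List.filter_cons, h, if_pos, Bool.not_true,
        Bool.false_eq_true, if_false]
      exact ih b
    · simp only [List.foldl_cons, List.filter_cons, h, Bool.not_false, if_true,
        Bool.false_eq_true, if_false]
      rw [ih]
      rfl

lemma pvAInner_eq (gt : List Int) (mg : PySem.Set Int) (df tol : Int) :
    pvAInner gt mg df tol = (pvU gt mg).foldl (pvG df) (tol + 1, -1) := by
  unfold pvAInner pvU
  exact pvSkipFold mg df _ _

lemma pvG_no_improve (df : Int) :
    ∀ (P : List (Int × Int)) (b : Int × Int), (∀ q ∈ P, b.1 ≤ pvDist df q) →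
      P.foldl (pvG df) b = b := by
  intro P
  induction P with
  | nil => intro b _; rfl
  | cons q l ih =>
    intro b h
    rw [List.foldl_cons]
    have hq : pvG df b q = b := by
      unfold pvG
      rw [if_neg]
      exact not_lt.mpr (h q (List.mem_cons_self))
    rw [hq]
    exact ih b (fun p hp => h p (List.mem_cons_of_mem _ hp))

lemma pvG_argmin (df : Int) :
    ∀ (P : List (Int × Int)) (b : Int × Int), (∃ q ∈ P, pvDist df q < b.1) →
      ∃ P₁ q P₂, P = P₁ ++ q :: P₂ ∧ P.foldl (pvG df) b = (pvDist df q, q.1) ∧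
        pvDist df q < b.1 ∧ (∀ p ∈ P₁, pvDist df q < pvDist df p) ∧
        (∀ p ∈ P₂, pvDist df q ≤ pvDist df p) := by
  intro P
  induction P with
  | nil => intro b h; obtain ⟨q, hq, _⟩ := h; exact absurd hq (List.not_mem_nil)
  | cons q l ih =>
    intro b hex
    by_cases hq : pvDist df q < b.1
    · have hstep : pvG df b q = (pvDist df q, q.1) := by unfold pvG; rw [if_pos hq]
      by_cases h2 : ∃ p ∈ l, pvDist df p < pvDist df q
      · obtain ⟨P₁, q', P₂, hsplit, hfold, hlt, h₁, h₂⟩ := ih (pvDist df q, q.1) h2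
        refine ⟨q :: P₁, q', P₂, by rw [hsplit]; rfl, ?_, lt_trans hlt hq, ?_, h₂⟩
        · rw [List.foldl_cons, hstep]; exact hfold
        · intro p hp
          rcases List.mem_cons.mp hp with rfl | hp'
          · exact hlt
          · exact h₁ p hp'
      · simp only [not_exists, not_and, not_lt] at h2
        refine ⟨[], q, l, rfl, ?_, hq, by simp, h2⟩
        rw [List.foldl_cons, hstep]
        exact pvG_no_improve df l (pvDist df q, q.1) h2
    · have hstep : pvG df b q = b := by unfold pvG; rw [if_neg hq]
      have hex' : ∃ p ∈ l, pvDist df p < b.1 := by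
        obtain ⟨p, hp, hd⟩ := hex
        rcases List.mem_cons.mp hp with rfl | hp'
        · exact absurd hd hq
        · exact ⟨p, hp', hd⟩
      obtain ⟨P₁, q', P₂, hsplit, hfold, hlt, h₁, h₂⟩ := ih b hex'
      refine ⟨q :: P₁, q', P₂, by rw [hsplit]; rfl, ?_, hlt, ?_, h₂⟩
      · rw [List.foldl_cons, hstep]; exact hfold
      · intro p hp
        rcases List.mem_cons.mp hp with rfl | hp'
        · exact lt_of_lt_of_le hlt (not_lt.mp hq)
        · exact h₁ p hp'

lemma pvAdvance_eq (gt : List Int) (df : Int) :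
    ∀ (i : Nat) (left : List Int),
      pvAdvance gt df left i
        = (left ++ (gt.drop i).takeWhile (fun v => decide (v < df)),
           i + ((gt.drop i).takeWhile (fun v => decide (v < df))).length) := by
  intro i
  induction hni : gt.length - i using Nat.strong_induction_on generalizing i with
  | _ n ih =>
    intro left
    by_cases h : i < gt.length
    · have hdrop : gt.drop i = gt[i] :: gt.drop (i + 1) := List.drop_eq_getElem_cons h
      by_cases hlt : gt[i] < df
      · have hrec := ih (gt.length - (i + 1)) (by omega) (i + 1) rfl (left ++ [gt[i]])
        rw [pvAdvance, dif_pos h, if_pos hlt, hrec, hdrop,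
          List.takeWhile_cons_of_pos (by simpa using hlt)]
        simp [List.append_assoc]
        omega
      · rw [pvAdvance, dif_pos h, if_neg hlt, hdrop,
          List.takeWhile_cons_of_neg (by simpa using hlt)]
        simp
    · rw [pvAdvance, dif_neg h]
      rw [List.drop_eq_nil_of_le (by omega)]
      simp

lemma pvLe_getLast : ∀ (l : List Int) (h : l ≠ []), l.Pairwise (· ≤ ·) →
    ∀ x ∈ l, x ≤ l.getLast h := by
  intro l
  induction l with
  | nil => intro h; exact absurd rfl h
  | cons a t ih =>
    intro h hs x hx
    obtain ⟨ha, ht⟩ := List.pairwise_cons.mp hs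
    cases t with
    | nil =>
      have : x = a := by simpa using hx
      subst this
      simp [List.getLast]
    | cons b t' =>
      rw [List.getLast_cons (by simp)]
      rcases List.mem_cons.mp hx with rfl | hx'
      · exact le_trans (ha _ (List.getLast_mem (by simp))) (le_refl _)
      · exact ih (by simp) ht x hx'

lemma pvConstDropLast (c : Int) : ∀ (ys : List Int), (∀ x ∈ ys, x = c) →
    (c :: ys).dropLast = ys := by
  intro ys
  induction ys with
  | nil => intro _; rfl
  | cons y t ih =>
    intro h
    have hy : y = c := h y List.mem_cons_self
    subst hy
    rw [List.dropLast_cons₂]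
    rw [ih (fun x hx => h x (List.mem_cons_of_mem _ hx))]

-- phase 2 of the inner scan: over the still-untouched tail (values ≥ df, nondecreasing)
lemma pvRFold (df : Int) :
    ∀ (dw : List Int) (s : Int) (b : Int × Int), dw.Pairwise (· ≤ ·) → (∀ v ∈ dw, df ≤ v) →
      (PySem.List.enumerate dw s).foldl (pvG df) b
        = match dw with
          | [] => b
          | r :: _ => if r - df < b.1 then (r - df, s) else b := by
  intro dw s b hsort hge
  cases dw with
  | nil => rfl
  | cons r t =>
    dsimp only
    obtain ⟨hr, ht⟩ := List.pairwise_cons.mp hsort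
    have hdr : pvDist df (s, r) = r - df := by
      unfold pvDist
      rw [abs_sub_comm, abs_of_nonneg (by have := hge r List.mem_cons_self; omega)]
    have hdt : ∀ q ∈ PySem.List.enumerate t (s + 1), r - df ≤ pvDist df q := by
      intro q hq
      obtain ⟨k, hk, rfl⟩ := (PySem.List.mem_enumerate_iff t (s + 1) q).mp hq
      have h1 : r ≤ t[k] := hr _ (List.getElem_mem hk)
      have h2 : df ≤ t[k] := hge _ (List.mem_cons_of_mem _ (List.getElem_mem hk))
      unfold pvDist
      rw [abs_sub_comm, abs_of_nonneg (by omega)]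
      omega
    rw [PySem.List.enumerate_cons, List.foldl_cons]
    by_cases hlt : r - df < b.1
    · have hstep : pvG df b (s, r) = (r - df, s) := by unfold pvG; rw [hdr, if_pos hlt]
      rw [hstep, if_pos hlt]
      exact pvG_no_improve df _ _ hdt
    · have hstep : pvG df b (s, r) = b := by unfold pvG; rw [hdr, if_neg hlt]
      rw [hstep, if_neg hlt]
      exact pvG_no_improve df _ _ (fun q hq => le_trans (not_lt.mp hlt) (hdt q hq))

-- phase 1 of the inner scan: over B's left stack (values < df, nondecreasing); the
-- first pair carrying the maximal value wins when its distance is within tolerance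
lemma pvLFold (df tol : Int) (P : List (Int × Int)) (hne : P ≠ [])
    (hval : ∀ q ∈ P, q.2 < df) (hsort : (P.map (·.2)).Pairwise (· ≤ ·))
    (hlast : df - (P.getLast hne).2 ≤ tol) :
    ∃ P₁ j P₂, P = P₁ ++ (j, (P.getLast hne).2) :: P₂ ∧
      P.foldl (pvG df) (tol + 1, -1) = (df - (P.getLast hne).2, j) ∧
      (∀ p ∈ P₁, p.2 < (P.getLast hne).2) ∧ (∀ p ∈ P₂, p.2 = (P.getLast hne).2) := by
  have hmem_last : P.getLast hne ∈ P := List.getLast_mem hne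
  have habs : ∀ q ∈ P, pvDist df q = df - q.2 := by
    intro q hq
    unfold pvDist
    rw [abs_of_nonneg (by have := hval q hq; omega)]
  have hlast_eq : (P.map (·.2)).getLast (by simpa using hne) = (P.getLast hne).2 := by
    rw [List.getLast_map]
  have hle : ∀ q ∈ P, q.2 ≤ (P.getLast hne).2 := by
    intro q hq
    have := pvLe_getLast (P.map (·.2)) (by simpa using hne) hsort q.2
      (List.mem_map_of_mem hq)
    rwa [hlast_eq] at this
  obtain ⟨P₁, q, P₂, hsplit, hfold, _hdlt, h₁, h₂⟩ := pvG_argmin df P (tol + 1, -1)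
    ⟨P.getLast hne, hmem_last, by rw [habs _ hmem_last]; dsimp; omega⟩
  have hqmem : q ∈ P := by rw [hsplit]; exact List.mem_append_right _ List.mem_cons_self
  have hdq : pvDist df q = df - q.2 := habs q hqmem
  have hql : q.2 = (P.getLast hne).2 := by
    have hlm : P.getLast hne ∈ P₁ ++ q :: P₂ := by rw [← hsplit]; exact hmem_last
    rcases List.mem_append.mp hlm with hin | hin
    · exfalso
      have := h₁ _ hin
      rw [hdq, habs _ hmem_last] at this
      have := hle q hqmem
      omega
    · rcases List.mem_cons.mp hin with heq | hin'
      · rw [← heq]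
      · have := h₂ _ hin'
        rw [hdq, habs _ hmem_last] at this
        have h3 := hle q hqmem
        omega
  refine ⟨P₁, q.1, P₂, ?_, ?_, ?_, ?_⟩
  · rw [← hql]; rw [hsplit]
  · rw [hfold, hdq, hql]
  · intro p hp
    have hlt2 := h₁ p hp
    have hpmem : p ∈ P := by rw [hsplit]; exact List.mem_append_left _ hp
    rw [hdq, habs _ hpmem, hql] at hlt2
    omega
  · intro p hp
    have hpmem : p ∈ P := by
      rw [hsplit]
      exact List.mem_append_right _ (List.mem_cons_of_mem _ hp)
    have hle2 := h₂ p hp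
    rw [hdq, habs _ hpmem, hql] at hle2
    -- sortedness gives the other direction: q.2 ≤ p.2
    have hsort2 : ((P₁ ++ q :: P₂).map (·.2)).Pairwise (· ≤ ·) := by rw [← hsplit]; exact hsort
    rw [List.map_append, List.map_cons] at hsort2
    have := (List.pairwise_append.mp hsort2).2.1
    have hqp := (List.pairwise_cons.mp this).1 p.2 (List.mem_map_of_mem hp)
    omega

lemma pvU_add (gt : List Int) (mg : PySem.Set Int) (j : Int) :
    pvU gt (PySem.Set.add mg j) = (pvU gt mg).filter (fun q => q.1 != j) := by
  unfold pvU
  rw [List.filter_filter]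
  apply List.filter_congr
  intro x _
  by_cases h2 : x.1 = j
  · have hmem : x.1 ∈ PySem.Set.add mg j := (PySem.Set.mem_add mg j x.1).mpr (Or.inr h2)
    rw [(PySem.Set.contains_iff _ _).mpr hmem]
    simp [h2]
  · by_cases h1 : x.1 ∈ mg
    · have hmem : x.1 ∈ PySem.Set.add mg j := (PySem.Set.mem_add mg j x.1).mpr (Or.inl h1)
      rw [(PySem.Set.contains_iff _ _).mpr hmem, (PySem.Set.contains_iff _ _).mpr h1]
      simp
    · have hmem : x.1 ∉ PySem.Set.add mg j := by
        intro hc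
        rcases (PySem.Set.mem_add mg j x.1).mp hc with h | h
        · exact h1 h
        · exact h2 h
      have e1 : PySem.Set.contains (PySem.Set.add mg j) x.1 = false := by
        cases hc : PySem.Set.contains (PySem.Set.add mg j) x.1
        · rfl
        · exact absurd ((PySem.Set.contains_iff _ _).mp hc) hmem
      have e2 : PySem.Set.contains mg x.1 = false := by
        cases hc : PySem.Set.contains mg x.1
        · rfl
        · exact absurd ((PySem.Set.contains_iff _ _).mp hc) h1
      rw [e1, e2]
      simp [h2]

lemma pvU_fst_lt (gt : List Int) (mg : PySem.Set Int) :
    (pvU gt mg).Pairwise (fun p q => p.1 < q.1) := by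
  exact List.Pairwise.sublist List.filter_sublist (PySem.List.pairwise_lt_enumerate gt 0)

lemma pvU_snd_sorted (gt : List Int) (mg : PySem.Set Int) (hgt : gt.Pairwise (· ≤ ·)) :
    ((pvU gt mg).map (·.2)).Pairwise (· ≤ ·) := by
  have h1 : ((pvU gt mg).map (·.2)).Sublist ((PySem.List.enumerate gt 0).map (·.2)) :=
    List.Sublist.map _ List.filter_sublist
  rw [PySem.List.map_snd_enumerate] at h1
  exact List.Pairwise.sublist h1 hgt

lemma pvU_not_mem (gt : List Int) (mg : PySem.Set Int) (q : Int × Int) (hq : q ∈ pvU gt mg) :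
    q.1 ∉ mg := by
  have := (List.mem_filter.mp hq).2
  intro hmem
  rw [(PySem.Set.contains_iff mg q.1).mpr hmem] at this
  simp at this

lemma pvU_fst_nonneg (gt : List Int) (mg : PySem.Set Int) (q : Int × Int)
    (hq : q ∈ pvU gt mg) : 0 ≤ q.1 := by
  have hmem : q ∈ PySem.List.enumerate gt 0 := (List.mem_filter.mp hq).1
  obtain ⟨k, hk, rfl⟩ := (PySem.List.mem_enumerate_iff gt 0 q).mp hmem
  dsimp only
  omega

lemma pvFilterErase (X Y : List (Int × Int)) (j v : Int)
    (h : (X ++ (j, v) :: Y).Pairwise (fun p q => p.1 < q.1)) :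
    (X ++ (j, v) :: Y).filter (fun q => q.1 != j) = X ++ Y := by
  obtain ⟨hX, hY', hXY⟩ := List.pairwise_append.mp h
  have hYlt := (List.pairwise_cons.mp hY').1
  rw [List.filter_append, List.filter_cons]
  have h1 : X.filter (fun q => q.1 != j) = X := by
    apply List.filter_eq_self.mpr
    intro p hp
    have hplt := hXY p hp (j, v) List.mem_cons_self
    dsimp only at hplt
    exact bne_iff_ne.mpr (by omega)
  have h2 : Y.filter (fun q => q.1 != j) = Y := by
    apply List.filter_eq_self.mpr
    intro p hp
    have hplt := hYlt p hp
    dsimp only at hplt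
    exact bne_iff_ne.mpr (by omega)
  have h3 : (((j, v) : Int × Int).1 != j) = false := by simp
  rw [h1, h2, h3]
  simp


lemma pvFinishLeft (gt : List Int) (tol df : Int) (mg : PySem.Set Int)
    (left : List Int) (i : Nat) (matched : Int) (fp : List Int)
    (left' : List Int) (i' : Nat) (P' P₁ P₂ : List (Int × Int)) (j L : Int)
    (hlen' : i' ≤ gt.length)
    (hU' : pvU gt mg = P' ++ PySem.List.enumerate (gt.drop i') (i' : Int))
    (hsnd' : P'.map (·.2) = left')
    (hfst' : ∀ q ∈ P', q.1 < (i' : Int))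
    (hleft'_lt : ∀ v ∈ left', v < df)
    (hsplit : P' = P₁ ++ (j, L) :: P₂)
    (hP₂ : ∀ p ∈ P₂, p.2 = L)
    (hdl : df - L ≤ tol)
    (hinner : pvAInner gt mg df tol = (df - L, j))
    (hB : pvBStep gt tol (left, i, matched, fp) df = (left'.dropLast, i', matched + 1, fp)) :
    ∃ P' : List (Int × Int),
      pvInvL gt (if (pvAInner gt mg df tol).2 ≥ 0 ∧ (pvAInner gt mg df tol).1 ≤ tol then
          PySem.Set.add mg (pvAInner gt mg df tol).2 else mg)
        (pvBStep gt tol (left, i, matched, fp) df).1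
        (pvBStep gt tol (left, i, matched, fp) df).2.1 P' ∧
      (∀ v ∈ (pvBStep gt tol (left, i, matched, fp) df).1, v < df) ∧
      (((if (pvAInner gt mg df tol).2 ≥ 0 ∧ (pvAInner gt mg df tol).1 ≤ tol then
          PySem.Set.add mg (pvAInner gt mg df tol).2 else mg).length : Int)
        = (mg.length : Int) + (if (pvAInner gt mg df tol).2 ≥ 0 ∧ (pvAInner gt mg df tol).1 ≤ tol then 1 else 0)) ∧
      (pvBStep gt tol (left, i, matched, fp) df).2.2.1
        = matched + (if (pvAInner gt mg df tol).2 ≥ 0 ∧ (pvAInner gt mg df tol).1 ≤ tol then 1 else 0) ∧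
      (pvBStep gt tol (left, i, matched, fp) df).2.2.2
        = fp ++ (if (pvAInner gt mg df tol).2 ≥ 0 ∧ (pvAInner gt mg df tol).1 ≤ tol then [] else [df]) := by
  have hjmem : ((j, L) : Int × Int) ∈ pvU gt mg := by
    rw [hU', hsplit]
    exact List.mem_append_left _ (List.mem_append_right _ List.mem_cons_self)
  have hj0 : 0 ≤ j := pvU_fst_nonneg gt mg _ hjmem
  have hjnot : j ∉ mg := pvU_not_mem gt mg _ hjmem
  have hcond : ((df - L, j) : Int × Int).2 ≥ 0 ∧ ((df - L, j) : Int × Int).1 ≤ tol := ⟨hj0, hdl⟩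
  have hpw : (P₁ ++ (j, L) :: (P₂ ++ PySem.List.enumerate (gt.drop i') (i' : Int))).Pairwise
      (fun p q => p.1 < q.1) := by
    have h := pvU_fst_lt gt mg
    rw [hU', hsplit] at h
    simpa [List.append_assoc] using h
  have herase : pvU gt (PySem.Set.add mg j)
      = (P₁ ++ P₂) ++ PySem.List.enumerate (gt.drop i') (i' : Int) := by
    rw [pvU_add, hU', hsplit, List.append_assoc, List.cons_append,
      pvFilterErase P₁ _ j L hpw, List.append_assoc]
  have hsndnew : (P₁ ++ P₂).map (·.2) = left'.dropLast := by
    have h10 : left' = P₁.map (·.2) ++ L :: P₂.map (·.2) := by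
      rw [← hsnd', hsplit, List.map_append, List.map_cons]
    rw [h10, List.dropLast_append_cons, List.map_append]
    congr 1
    exact (pvConstDropLast L (P₂.map (·.2)) (by
      intro x hx
      obtain ⟨p, hp, rfl⟩ := List.mem_map.mp hx
      exact hP₂ p hp)).symm
  have hcondTrue : ((((df - L, j) : Int × Int).2 ≥ 0 ∧ ((df - L, j) : Int × Int).1 ≤ tol)) = True :=
    eq_true hcond
  rw [hinner, hB]
  simp only [hcondTrue, if_true]
  refine ⟨P₁ ++ P₂, ⟨hlen', ?_, hsndnew, ?_⟩, ?_, ?_, by simp, by simp⟩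
  · dsimp only
    exact herase
  · intro q hq
    apply hfst'
    rw [hsplit]
    rcases List.mem_append.mp hq with h | h
    · exact List.mem_append_left _ h
    · exact List.mem_append_right _ (List.mem_cons_of_mem _ h)
  · intro v hv
    exact hleft'_lt v ((List.dropLast_sublist (l := left')).subset hv)
  · dsimp only
    rw [PySem.Set.add_of_not_mem hjnot]
    simp [List.length_append]
    try omega

lemma pvFinishRight (gt : List Int) (tol df : Int) (mg : PySem.Set Int)
    (left : List Int) (i : Nat) (matched : Int) (fp : List Int)
    (left' : List Int) (i' : Nat) (P' : List (Int × Int)) (r : Int) (t : List Int)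
    (hi'lt : i' < gt.length)
    (hU' : pvU gt mg = P' ++ PySem.List.enumerate (gt.drop i') (i' : Int))
    (hdropcons : gt.drop i' = r :: t)
    (hsnd' : P'.map (·.2) = left')
    (hfst' : ∀ q ∈ P', q.1 < (i' : Int))
    (hleft'_lt : ∀ v ∈ left', v < df)
    (hdr : r - df ≤ tol)
    (hinner : pvAInner gt mg df tol = (r - df, (i' : Int)))
    (hB : pvBStep gt tol (left, i, matched, fp) df = (left', i' + 1, matched + 1, fp)) :
    ∃ P' : List (Int × Int),
      pvInvL gt (if (pvAInner gt mg df tol).2 ≥ 0 ∧ (pvAInner gt mg df tol).1 ≤ tol then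
          PySem.Set.add mg (pvAInner gt mg df tol).2 else mg)
        (pvBStep gt tol (left, i, matched, fp) df).1
        (pvBStep gt tol (left, i, matched, fp) df).2.1 P' ∧
      (∀ v ∈ (pvBStep gt tol (left, i, matched, fp) df).1, v < df) ∧
      (((if (pvAInner gt mg df tol).2 ≥ 0 ∧ (pvAInner gt mg df tol).1 ≤ tol then
          PySem.Set.add mg (pvAInner gt mg df tol).2 else mg).length : Int)
        = (mg.length : Int) + (if (pvAInner gt mg df tol).2 ≥ 0 ∧ (pvAInner gt mg df tol).1 ≤ tol then 1 else 0)) ∧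
      (pvBStep gt tol (left, i, matched, fp) df).2.2.1
        = matched + (if (pvAInner gt mg df tol).2 ≥ 0 ∧ (pvAInner gt mg df tol).1 ≤ tol then 1 else 0) ∧
      (pvBStep gt tol (left, i, matched, fp) df).2.2.2
        = fp ++ (if (pvAInner gt mg df tol).2 ≥ 0 ∧ (pvAInner gt mg df tol).1 ≤ tol then [] else [df]) := by
  have hdropt : gt.drop (i' + 1) = t := by
    have h2 : List.drop 1 (List.drop i' gt) = List.drop (i' + 1) gt := List.drop_drop
    rw [← h2, hdropcons]
    rfl
  have hRcons : PySem.List.enumerate (gt.drop i') (i' : Int)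
      = ((i' : Int), r) :: PySem.List.enumerate t ((i' : Int) + 1) := by
    rw [hdropcons, PySem.List.enumerate_cons]
  have himem : (((i' : Int), r) : Int × Int) ∈ pvU gt mg := by
    rw [hU', hRcons]
    exact List.mem_append_right _ List.mem_cons_self
  have hinot : ((i' : Int)) ∉ mg := pvU_not_mem gt mg _ himem
  have hcond : ((r - df, (i' : Int)) : Int × Int).2 ≥ 0 ∧ ((r - df, (i' : Int)) : Int × Int).1 ≤ tol :=
    ⟨by dsimp only; omega, hdr⟩
  have hpw : (P' ++ ((i' : Int), r) :: PySem.List.enumerate t ((i' : Int) + 1)).Pairwise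
      (fun p q => p.1 < q.1) := by
    have h := pvU_fst_lt gt mg
    rw [hU', hRcons] at h
    exact h
  have hcastI : (i' : Int) + 1 = ((i' + 1 : Nat) : Int) := by push_cast; ring
  have herase : pvU gt (PySem.Set.add mg (i' : Int))
      = P' ++ PySem.List.enumerate (gt.drop (i' + 1)) ((i' + 1 : Nat) : Int) := by
    rw [pvU_add, hU', hRcons, pvFilterErase P' _ _ r hpw, hdropt, hcastI]
  have hcondTrue : ((((r - df, (i' : Int)) : Int × Int).2 ≥ 0 ∧
      (((r - df, (i' : Int)) : Int × Int).1 ≤ tol))) = True := eq_true hcond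
  rw [hinner, hB]
  simp only [hcondTrue, if_true]
  refine ⟨P', ⟨by omega, ?_, hsnd', ?_⟩, hleft'_lt, ?_, by simp, by simp⟩
  · dsimp only
    exact herase
  · intro q hq
    exact lt_of_lt_of_le (hfst' q hq) (by push_cast; omega)
  · dsimp only
    rw [PySem.Set.add_of_not_mem hinot]
    simp [List.length_append]
    try omega

lemma pvFinishNone (gt : List Int) (tol df : Int) (mg : PySem.Set Int)
    (left : List Int) (i : Nat) (matched : Int) (fp : List Int)
    (left' : List Int) (i' : Nat) (P' : List (Int × Int))
    (hlen' : i' ≤ gt.length)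
    (hU' : pvU gt mg = P' ++ PySem.List.enumerate (gt.drop i') (i' : Int))
    (hsnd' : P'.map (·.2) = left')
    (hfst' : ∀ q ∈ P', q.1 < (i' : Int))
    (hleft'_lt : ∀ v ∈ left', v < df)
    (hinner : pvAInner gt mg df tol = (tol + 1, -1))
    (hB : pvBStep gt tol (left, i, matched, fp) df = (left', i', matched, fp ++ [df])) :
    ∃ P' : List (Int × Int),
      pvInvL gt (if (pvAInner gt mg df tol).2 ≥ 0 ∧ (pvAInner gt mg df tol).1 ≤ tol then
          PySem.Set.add mg (pvAInner gt mg df tol).2 else mg)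
        (pvBStep gt tol (left, i, matched, fp) df).1
        (pvBStep gt tol (left, i, matched, fp) df).2.1 P' ∧
      (∀ v ∈ (pvBStep gt tol (left, i, matched, fp) df).1, v < df) ∧
      (((if (pvAInner gt mg df tol).2 ≥ 0 ∧ (pvAInner gt mg df tol).1 ≤ tol then
          PySem.Set.add mg (pvAInner gt mg df tol).2 else mg).length : Int)
        = (mg.length : Int) + (if (pvAInner gt mg df tol).2 ≥ 0 ∧ (pvAInner gt mg df tol).1 ≤ tol then 1 else 0)) ∧
      (pvBStep gt tol (left, i, matched, fp) df).2.2.1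
        = matched + (if (pvAInner gt mg df tol).2 ≥ 0 ∧ (pvAInner gt mg df tol).1 ≤ tol then 1 else 0) ∧
      (pvBStep gt tol (left, i, matched, fp) df).2.2.2
        = fp ++ (if (pvAInner gt mg df tol).2 ≥ 0 ∧ (pvAInner gt mg df tol).1 ≤ tol then [] else [df]) := by
  have hnm : ¬(((tol + 1, (-1 : Int)) : Int × Int).2 ≥ 0 ∧ ((tol + 1, (-1 : Int)) : Int × Int).1 ≤ tol) := by
    rintro ⟨h1, -⟩
    simp at h1
  have hcondFalse : ((((tol + 1, (-1 : Int)) : Int × Int).2 ≥ 0 ∧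
      (((tol + 1, (-1 : Int)) : Int × Int).1 ≤ tol))) = False := eq_false hnm
  rw [hinner, hB]
  simp only [hcondFalse, if_false]
  refine ⟨P', ⟨hlen', hU', hsnd', hfst'⟩, hleft'_lt, by simp, by simp, by simp⟩

-- one detection step: A's rescan and B's neighbour choice make the same decision and
-- remove the same ground-truth value
lemma pvStep (gt : List Int) (tol df : Int) (hgt : gt.Pairwise (· ≤ ·))
    (mg : PySem.Set Int) (left : List Int) (i : Nat) (P : List (Int × Int))
    (matched : Int) (fp : List Int)
    (inv : pvInvL gt mg left i P) (hlt : ∀ v ∈ left, v < df) :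
    ∃ P' : List (Int × Int),
      pvInvL gt (if (pvAInner gt mg df tol).2 ≥ 0 ∧ (pvAInner gt mg df tol).1 ≤ tol then
          PySem.Set.add mg (pvAInner gt mg df tol).2 else mg)
        (pvBStep gt tol (left, i, matched, fp) df).1
        (pvBStep gt tol (left, i, matched, fp) df).2.1 P' ∧
      (∀ v ∈ (pvBStep gt tol (left, i, matched, fp) df).1, v < df) ∧
      (((if (pvAInner gt mg df tol).2 ≥ 0 ∧ (pvAInner gt mg df tol).1 ≤ tol then
          PySem.Set.add mg (pvAInner gt mg df tol).2 else mg).length : Int)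
        = (mg.length : Int) + (if (pvAInner gt mg df tol).2 ≥ 0 ∧ (pvAInner gt mg df tol).1 ≤ tol then 1 else 0)) ∧
      (pvBStep gt tol (left, i, matched, fp) df).2.2.1
        = matched + (if (pvAInner gt mg df tol).2 ≥ 0 ∧ (pvAInner gt mg df tol).1 ≤ tol then 1 else 0) ∧
      (pvBStep gt tol (left, i, matched, fp) df).2.2.2
        = fp ++ (if (pvAInner gt mg df tol).2 ≥ 0 ∧ (pvAInner gt mg df tol).1 ≤ tol then [] else [df]) := by
  obtain ⟨hlen, hU, hsnd, hfst⟩ := inv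
  have hadv := pvAdvance_eq gt df i left
  set tw := (gt.drop i).takeWhile (fun v => decide (v < df)) with htwdef
  set dw := (gt.drop i).dropWhile (fun v => decide (v < df)) with hdwdef
  set i' := i + tw.length with hi'def
  set left' := left ++ tw with hleft'def
  have htd : tw ++ dw = gt.drop i := List.takeWhile_append_dropWhile
  have hdrop' : gt.drop i' = dw := by
    rw [hi'def, ← List.drop_drop, ← htd, List.drop_left]
  have hlen' : i' ≤ gt.length := by
    have h2 : tw.length + dw.length = (gt.drop i).length := by
      rw [← htd]; simp
    have h3 : (gt.drop i).length = gt.length - i := by simp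
    omega
  have htw_lt : ∀ v ∈ tw, v < df := by
    intro v hv
    simpa using List.mem_takeWhile_imp hv
  have hleft'_lt : ∀ v ∈ left', v < df := by
    intro v hv
    rcases List.mem_append.mp (hleft'def ▸ hv) with h | h
    · exact hlt v h
    · exact htw_lt v h
  have hcast : (i : Int) + (tw.length : Int) = (i' : Int) := by
    rw [hi'def]; push_cast; ring
  have hU' : pvU gt mg = (P ++ PySem.List.enumerate tw (i : Int)) ++ PySem.List.enumerate dw (i' : Int) := by
    rw [hU, ← htd, PySem.List.enumerate_append, hcast, List.append_assoc]
  set P' := P ++ PySem.List.enumerate tw (i : Int) with hP'def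
  set R := PySem.List.enumerate dw (i' : Int) with hRdef
  have hsnd' : P'.map (·.2) = left' := by
    rw [hP'def, List.map_append, hsnd, PySem.List.map_snd_enumerate, hleft'def]
  have hfst' : ∀ q ∈ P', q.1 < (i' : Int) := by
    intro q hq
    rcases List.mem_append.mp (hP'def ▸ hq) with h | h
    · have h4 := hfst q h
      omega
    · obtain ⟨k, hk, rfl⟩ := (PySem.List.mem_enumerate_iff tw (i : Int) q).mp h
      dsimp only
      omega
  have hvalP' : ∀ q ∈ P', q.2 < df := by
    intro q hq
    apply hleft'_lt
    rw [← hsnd']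
    exact List.mem_map_of_mem hq
  have hUsnd : (pvU gt mg).map (·.2) = left' ++ dw := by
    rw [hU', List.map_append, hsnd', hRdef, PySem.List.map_snd_enumerate]
  have hleft'_sorted : left'.Pairwise (· ≤ ·) := by
    have hs := pvU_snd_sorted gt mg hgt
    rw [hUsnd] at hs
    exact (List.pairwise_append.mp hs).1
  have hsortP' : (P'.map (·.2)).Pairwise (· ≤ ·) := by
    rw [hsnd']; exact hleft'_sorted
  have hdw_sorted : dw.Pairwise (· ≤ ·) := by
    rw [← hdrop']
    exact List.Pairwise.sublist (List.drop_sublist _ _) hgt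
  have hdw_ge : ∀ v ∈ dw, df ≤ v := by
    intro v hv
    cases hdww : dw with
    | nil => rw [hdww] at hv; simp at hv
    | cons r t =>
      have hwne : (gt.drop i).dropWhile (fun v => decide (v < df)) ≠ [] := by
        rw [← hdwdef, hdww]; simp
      have hr := List.head_dropWhile_not (fun v => decide (v < df)) hwne
      have he : (gt.drop i).dropWhile (fun v => decide (v < df)) = r :: t := by
        rw [← hdwdef]; exact hdww
      have hhead : ((gt.drop i).dropWhile (fun v => decide (v < df))).head hwne = r := by
        simp only [he, List.head_cons]
      rw [hhead] at hr
      simp only [decide_eq_false_iff_not, not_lt] at hr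
      rw [hdww] at hv
      have hsorted2 : (r :: t).Pairwise (· ≤ ·) := hdww ▸ hdw_sorted
      rcases List.mem_cons.mp hv with rfl | hv'
      · exact hr
      · exact le_trans hr ((List.pairwise_cons.mp hsorted2).1 v hv')
  have hidw : dw ≠ [] ↔ i' < gt.length := by
    rw [← hdrop', ne_eq, List.drop_eq_nil_iff, not_le]
  by_cases hLne : left' = []
  · -- empty left stack
    have hP'nil : P' = [] := List.map_eq_nil_iff.mp (by rw [hsnd', hLne])
    have hglnone : left'.getLast? = none := by rw [hLne]; rfl
    cases hdww : dw with
    | nil =>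
      have hdrnone : ¬ i' < gt.length := by
        intro h
        have h2 := hidw.mpr h
        rw [hdww] at h2
        exact h2 rfl
      have hinner : pvAInner gt mg df tol = (tol + 1, -1) := by
        rw [pvAInner_eq, hU', hP'nil, List.nil_append, hRdef,
          pvRFold df dw (i' : Int) (tol + 1, -1) hdw_sorted hdw_ge, hdww]
      have hB : pvBStep gt tol (left, i, matched, fp) df = (left', i', matched, fp ++ [df]) := by
        unfold pvBStep
        dsimp only
        rw [hadv]
        dsimp only
        rw [hglnone, dif_neg hdrnone]
        rfl
      exact pvFinishNone gt tol df mg left i matched fp left' i' P' hlen'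
        (by rw [hdrop', ← hRdef]; exact hU') hsnd' hfst' hleft'_lt hinner hB
    | cons r t =>
      have hi'lt : i' < gt.length := hidw.mp (by rw [hdww]; simp)
      have hdropcons : gt.drop i' = r :: t := by rw [hdrop', hdww]
      have h6 := (List.drop_eq_getElem_cons hi'lt).symm
      rw [hdropcons] at h6
      injection h6 with hgtv _hdropt
      by_cases hdr : r - df ≤ tol
      · have hinner : pvAInner gt mg df tol = (r - df, (i' : Int)) := by
          rw [pvAInner_eq, hU', hP'nil, List.nil_append, hRdef,
            pvRFold df dw (i' : Int) (tol + 1, -1) hdw_sorted hdw_ge, hdww]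
          dsimp only
          rw [if_pos (by omega : r - df < tol + 1)]
        have hB : pvBStep gt tol (left, i, matched, fp) df = (left', i' + 1, matched + 1, fp) := by
          unfold pvBStep
          dsimp only
          rw [hadv]
          dsimp only
          rw [hglnone, dif_pos hi'lt, hgtv]
          simp [hdr]
        exact pvFinishRight gt tol df mg left i matched fp left' i' P' r t hi'lt
          (by rw [hdrop', ← hRdef]; exact hU') hdropcons hsnd' hfst' hleft'_lt hdr hinner hB
      · have hinner : pvAInner gt mg df tol = (tol + 1, -1) := by
          rw [pvAInner_eq, hU', hP'nil, List.nil_append, hRdef,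
            pvRFold df dw (i' : Int) (tol + 1, -1) hdw_sorted hdw_ge, hdww]
          dsimp only
          rw [if_neg (by omega : ¬ r - df < tol + 1)]
        have hB : pvBStep gt tol (left, i, matched, fp) df = (left', i', matched, fp ++ [df]) := by
          unfold pvBStep
          dsimp only
          rw [hadv]
          dsimp only
          rw [hglnone, dif_pos hi'lt, hgtv]
          simp [hdr]
        exact pvFinishNone gt tol df mg left i matched fp left' i' P' hlen'
          (by rw [hdrop', ← hRdef]; exact hU') hsnd' hfst' hleft'_lt hinner hB
  · -- nonempty left stack
    have hP'ne : P' ≠ [] := fun h0 => hLne (by rw [← hsnd', h0]; rfl)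
    have hgl : left'.getLast? = some (left'.getLast hLne) := List.getLast?_eq_some_getLast hLne
    have hlastP' : (P'.getLast hP'ne).2 = left'.getLast hLne := by
      have h1 : (P'.map (·.2)).getLast? = some ((P'.getLast hP'ne).2) := by
        rw [List.getLast?_eq_some_getLast (show P'.map (·.2) ≠ [] by simpa using hP'ne), List.getLast_map]
      rw [hsnd', List.getLast?_eq_some_getLast hLne] at h1
      exact (Option.some.inj h1).symm
    set L := left'.getLast hLne with hLdef
    have hPdist : ∀ q ∈ P', df - L ≤ pvDist df q := by
      intro q hq
      have hq2 : q.2 ≤ L := by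
        apply pvLe_getLast left' hLne hleft'_sorted
        rw [← hsnd']
        exact List.mem_map_of_mem hq
      have hqv := hvalP' q hq
      unfold pvDist
      rw [abs_of_nonneg (by omega)]
      omega
    by_cases hdl : df - L ≤ tol
    · obtain ⟨P₁, j, P₂, hsplit, hfold1, _hP₁, hP₂⟩ :=
        pvLFold df tol P' hP'ne hvalP' hsortP' (by rw [hlastP']; exact hdl)
      rw [hlastP'] at hsplit hfold1 hP₂
      cases hdww : dw with
      | nil =>
        have hdrnone : ¬ i' < gt.length := by
          intro h
          have h2 := hidw.mpr h
          rw [hdww] at h2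
          exact h2 rfl
        have hinner : pvAInner gt mg df tol = (df - L, j) := by
          rw [pvAInner_eq, hU', List.foldl_append, hfold1, hRdef,
            pvRFold df dw (i' : Int) (df - L, j) hdw_sorted hdw_ge, hdww]
        have hB : pvBStep gt tol (left, i, matched, fp) df = (left'.dropLast, i', matched + 1, fp) := by
          unfold pvBStep
          dsimp only
          rw [hadv]
          dsimp only
          rw [hgl, dif_neg hdrnone]
          simp [hdl]
        exact pvFinishLeft gt tol df mg left i matched fp left' i' P' P₁ P₂ j L hlen'
          (by rw [hdrop', ← hRdef]; exact hU') hsnd' hfst' hleft'_lt hsplit hP₂ hdl hinner hB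
      | cons r t =>
        have hi'lt : i' < gt.length := hidw.mp (by rw [hdww]; simp)
        have hdropcons : gt.drop i' = r :: t := by rw [hdrop', hdww]
        have h6 := (List.drop_eq_getElem_cons hi'lt).symm
        rw [hdropcons] at h6
        injection h6 with hgtv _hdropt
        by_cases hdldr : df - L ≤ r - df
        · have hinner : pvAInner gt mg df tol = (df - L, j) := by
            rw [pvAInner_eq, hU', List.foldl_append, hfold1, hRdef,
              pvRFold df dw (i' : Int) (df - L, j) hdw_sorted hdw_ge, hdww]
            dsimp only
            rw [if_neg (by omega : ¬ r - df < df - L)]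
          have hB : pvBStep gt tol (left, i, matched, fp) df = (left'.dropLast, i', matched + 1, fp) := by
            unfold pvBStep
            dsimp only
            rw [hadv]
            dsimp only
            rw [hgl, dif_pos hi'lt, hgtv]
            simp [hdl, hdldr]
          exact pvFinishLeft gt tol df mg left i matched fp left' i' P' P₁ P₂ j L hlen'
            (by rw [hdrop', ← hRdef]; exact hU') hsnd' hfst' hleft'_lt hsplit hP₂ hdl hinner hB
        · have hdr : r - df ≤ tol := by omega
          have hinner : pvAInner gt mg df tol = (r - df, (i' : Int)) := by
            rw [pvAInner_eq, hU', List.foldl_append, hfold1, hRdef,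
              pvRFold df dw (i' : Int) (df - L, j) hdw_sorted hdw_ge, hdww]
            dsimp only
            rw [if_pos (by omega : r - df < df - L)]
          have hB : pvBStep gt tol (left, i, matched, fp) df = (left', i' + 1, matched + 1, fp) := by
            unfold pvBStep
            dsimp only
            rw [hadv]
            dsimp only
            rw [hgl, dif_pos hi'lt, hgtv]
            simp [hdldr, hdr]
          exact pvFinishRight gt tol df mg left i matched fp left' i' P' r t hi'lt
            (by rw [hdrop', ← hRdef]; exact hU') hdropcons hsnd' hfst' hleft'_lt hdr hinner hB
    · have hfold1 : P'.foldl (pvG df) (tol + 1, -1) = (tol + 1, -1) := by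
        apply pvG_no_improve
        intro q hq
        have hd := hPdist q hq
        dsimp only
        omega
      cases hdww : dw with
      | nil =>
        have hdrnone : ¬ i' < gt.length := by
          intro h
          have h2 := hidw.mpr h
          rw [hdww] at h2
          exact h2 rfl
        have hinner : pvAInner gt mg df tol = (tol + 1, -1) := by
          rw [pvAInner_eq, hU', List.foldl_append, hfold1, hRdef,
            pvRFold df dw (i' : Int) (tol + 1, -1) hdw_sorted hdw_ge, hdww]
        have hB : pvBStep gt tol (left, i, matched, fp) df = (left', i', matched, fp ++ [df]) := by
          unfold pvBStep
          dsimp only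
          rw [hadv]
          dsimp only
          rw [hgl, dif_neg hdrnone]
          simp [hdl]
        exact pvFinishNone gt tol df mg left i matched fp left' i' P' hlen'
          (by rw [hdrop', ← hRdef]; exact hU') hsnd' hfst' hleft'_lt hinner hB
      | cons r t =>
        have hi'lt : i' < gt.length := hidw.mp (by rw [hdww]; simp)
        have hdropcons : gt.drop i' = r :: t := by rw [hdrop', hdww]
        have h6 := (List.drop_eq_getElem_cons hi'lt).symm
        rw [hdropcons] at h6
        injection h6 with hgtv _hdropt
        by_cases hdr : r - df ≤ tol
        · have hinner : pvAInner gt mg df tol = (r - df, (i' : Int)) := by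
            rw [pvAInner_eq, hU', List.foldl_append, hfold1, hRdef,
              pvRFold df dw (i' : Int) (tol + 1, -1) hdw_sorted hdw_ge, hdww]
            dsimp only
            rw [if_pos (by omega : r - df < tol + 1)]
          have hB : pvBStep gt tol (left, i, matched, fp) df = (left', i' + 1, matched + 1, fp) := by
            unfold pvBStep
            dsimp only
            rw [hadv]
            dsimp only
            rw [hgl, dif_pos hi'lt, hgtv]
            simp [hdl, hdr]
          exact pvFinishRight gt tol df mg left i matched fp left' i' P' r t hi'lt
            (by rw [hdrop', ← hRdef]; exact hU') hdropcons hsnd' hfst' hleft'_lt hdr hinner hB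
        · have hinner : pvAInner gt mg df tol = (tol + 1, -1) := by
            rw [pvAInner_eq, hU', List.foldl_append, hfold1, hRdef,
              pvRFold df dw (i' : Int) (tol + 1, -1) hdw_sorted hdw_ge, hdww]
            dsimp only
            rw [if_neg (by omega : ¬ r - df < tol + 1)]
          have hB : pvBStep gt tol (left, i, matched, fp) df = (left', i', matched, fp ++ [df]) := by
            unfold pvBStep
            dsimp only
            rw [hadv]
            dsimp only
            rw [hgl, dif_pos hi'lt, hgtv]
            simp [hdl, hdr]
          exact pvFinishNone gt tol df mg left i matched fp left' i' P' hlen'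
            (by rw [hdrop', ← hRdef]; exact hU') hsnd' hfst' hleft'_lt hinner hB

lemma pvMdMono (gt : List Int) (tol : Int) :
    ∀ (l : List (Int × Int)) (st : PySem.Set Int × PySem.Set Int),
      st.2 ⊆ (l.foldl (pvAStep gt tol) st).2 := by
  intro l
  induction l with
  | nil => intro st a h; exact h
  | cons p l ih =>
    intro st
    rw [List.foldl_cons]
    refine List.Subset.trans ?_ (ih _)
    unfold pvAStep
    dsimp only
    split
    · show st.2 ⊆ PySem.Set.add st.2 p.1
      rw [PySem.Set.add_eq_ite]
      split
      · exact fun a h => h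
      · exact List.subset_append_left _ _
    · exact fun a h => h

lemma pvMain (gt : List Int) (tol : Int) (hgt : gt.Pairwise (· ≤ ·)) :
    ∀ (dets : List Int) (k : Int) (mg md : PySem.Set Int) (left : List Int) (i : Nat)
      (matched : Int) (fp : List Int) (P : List (Int × Int)),
      dets.Pairwise (· ≤ ·) →
      pvInvL gt mg left i P →
      (∀ v ∈ left, ∀ d ∈ dets, v < d) →
      (mg.length : Int) = matched →
      (∀ j ∈ md, j < k) →
      ((((PySem.List.enumerate dets k).foldl (pvAStep gt tol) (mg, md)).1.length : Int)
          = (dets.foldl (pvBStep gt tol) (left, i, matched, fp)).2.2.1) ∧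
      (∃ Q, pvInvL gt ((PySem.List.enumerate dets k).foldl (pvAStep gt tol) (mg, md)).1
          (dets.foldl (pvBStep gt tol) (left, i, matched, fp)).1
          (dets.foldl (pvBStep gt tol) (left, i, matched, fp)).2.1 Q) ∧
      ((dets.foldl (pvBStep gt tol) (left, i, matched, fp)).2.2.2
          = fp ++ ((PySem.List.enumerate dets k).filter
              (fun p => ! PySem.Set.contains ((PySem.List.enumerate dets k).foldl (pvAStep gt tol) (mg, md)).2 p.1)).map (·.2)) ∧
      (∀ j ∈ ((PySem.List.enumerate dets k).foldl (pvAStep gt tol) (mg, md)).2, j ∈ md ∨ k ≤ j) := by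
  intro dets
  induction dets with
  | nil =>
    intro k mg md left i matched fp P _ inv _ hm hmd
    refine ⟨by simpa using hm, ⟨P, by simpa using inv⟩, by simp, ?_⟩
    intro j hj
    simp only [PySem.List.enumerate_nil, List.foldl_nil] at hj
    exact Or.inl hj
  | cons df rest ih =>
    intro k mg md left i matched fp P hsorted inv hleftd hm hmd
    obtain ⟨hd, hrest⟩ := List.pairwise_cons.mp hsorted
    obtain ⟨P', hinv', hbval, hcnt, hmatch, hfpval⟩ :=
      pvStep gt tol df hgt mg left i P matched fp inv
        (fun v hv => hleftd v hv df List.mem_cons_self)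
    rw [PySem.List.enumerate_cons, List.foldl_cons, List.foldl_cons]
    have hb : pvBStep gt tol (left, i, matched, fp) df
        = ((pvBStep gt tol (left, i, matched, fp) df).1,
           (pvBStep gt tol (left, i, matched, fp) df).2.1,
           (pvBStep gt tol (left, i, matched, fp) df).2.2.1,
           (pvBStep gt tol (left, i, matched, fp) df).2.2.2) := rfl
    by_cases hc : (pvAInner gt mg df tol).2 ≥ 0 ∧ (pvAInner gt mg df tol).1 ≤ tol
    · rw [if_pos hc] at hinv' hcnt hmatch hfpval
      have hstepA : pvAStep gt tol (mg, md) (k, df)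
          = (PySem.Set.add mg (pvAInner gt mg df tol).2, PySem.Set.add md k) := by
        unfold pvAStep
        dsimp only
        rw [if_pos hc]
      rw [hstepA]
      rw [hmatch, hfpval] at hb
      rw [hb]
      obtain ⟨ic1, ic2, ic3, ic4⟩ := ih (k + 1) (PySem.Set.add mg (pvAInner gt mg df tol).2)
        (PySem.Set.add md k)
        (pvBStep gt tol (left, i, matched, fp) df).1
        (pvBStep gt tol (left, i, matched, fp) df).2.1
        (matched + 1) (fp ++ []) P' hrest hinv'
        (fun v hv d hdm => lt_of_lt_of_le (hbval v hv) (hd d hdm))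
        (by rw [hcnt, hm, if_pos hc])
        (by
          intro j hj
          rcases (PySem.Set.mem_add md k j).mp hj with h | h
          · exact lt_trans (hmd j h) (by omega)
          · omega)
      refine ⟨ic1, ic2, ?_, ?_⟩
      · rw [ic3]
        have hkmem : k ∈ ((PySem.List.enumerate rest (k + 1)).foldl (pvAStep gt tol)
            (PySem.Set.add mg (pvAInner gt mg df tol).2, PySem.Set.add md k)).2 :=
          pvMdMono gt tol _ _ ((PySem.Set.mem_add md k k).mpr (Or.inr rfl))
        have hktrue := (PySem.Set.contains_iff _ _).mpr hkmem
        simp only [List.filter_cons, hktrue, Bool.not_true, List.append_nil]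
        try rw [if_pos hkmem]
        try simp
      · intro j hj
        rcases ic4 j hj with h | h
        · rcases (PySem.Set.mem_add md k j).mp h with h' | h'
          · exact Or.inl h'
          · exact Or.inr (by omega)
        · exact Or.inr (by omega)
    · rw [if_neg hc] at hinv' hcnt hmatch hfpval
      have hstepA : pvAStep gt tol (mg, md) (k, df) = (mg, md) := by
        unfold pvAStep
        dsimp only
        rw [if_neg hc]
      rw [hstepA]
      rw [hmatch, hfpval] at hb
      rw [hb]
      obtain ⟨ic1, ic2, ic3, ic4⟩ := ih (k + 1) mg md
        (pvBStep gt tol (left, i, matched, fp) df).1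
        (pvBStep gt tol (left, i, matched, fp) df).2.1
        (matched + 0) (fp ++ [df]) P' hrest hinv'
        (fun v hv d hdm => lt_of_lt_of_le (hbval v hv) (hd d hdm))
        (by rw [hm]; ring)
        (fun j hj => lt_trans (hmd j hj) (by omega))
      refine ⟨ic1, ic2, ?_, ?_⟩
      · rw [ic3]
        have hknot : k ∉ ((PySem.List.enumerate rest (k + 1)).foldl (pvAStep gt tol) (mg, md)).2 := by
          intro hk
          rcases ic4 k hk with h | h
          · exact absurd (hmd k h) (lt_irrefl k)
          · omega
        have hkfalse : PySem.Set.contains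
            ((PySem.List.enumerate rest (k + 1)).foldl (pvAStep gt tol) (mg, md)).2 k = false := by
          cases hcc : PySem.Set.contains
              ((PySem.List.enumerate rest (k + 1)).foldl (pvAStep gt tol) (mg, md)).2 k
          · rfl
          · exact absurd ((PySem.Set.contains_iff _ _).mp hcc) hknot
        simp only [List.filter_cons, hkfalse, Bool.not_false, List.append_assoc]
        try rw [if_neg hknot]
        try simp
      · intro j hj
        rcases ic4 j hj with h | h
        · exact Or.inl h
        · exact Or.inr (by omega)

lemma pvRangeFilterMap (l : List Int) (s : PySem.Set Int) :
    ((PySem.List.pyRange 0 l.length 1).filter (fun i => ! PySem.Set.contains s i)).map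
        (fun i => PySem.List.pyGetD l i 0)
      = ((PySem.List.enumerate l 0).filter (fun q => ! PySem.Set.contains s q.1)).map (·.2) := by
  rw [PySem.List.enumerate_eq_map_pyRange l 0, List.filter_map, List.map_map]
  rfl

lemma pvDet0_eq (events : List (Int × Int × Int)) :
    events.foldl (fun acc e => (PySem.List.pyRange 0 e.2.1 1).foldl (fun a _ => a ++ [e.1]) acc) []
      = events.foldl (fun acc (e : Int × Int × Int) => acc ++ List.replicate e.2.1.toNat e.1) [] := by
  have hrep : ∀ (c : Int) (l : List Int) (acc : List Int),
      l.foldl (fun a _ => a ++ [c]) acc = acc ++ List.replicate l.length c := by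
    intro c l
    induction l with
    | nil => intro acc; simp
    | cons x t ih =>
      intro acc
      rw [List.foldl_cons, ih, List.append_assoc]
      simp [List.replicate_succ]
  apply PySem.List.foldl_congr_mem
  intro acc e _
  rw [hrep, PySem.List.length_pyRange_one]
  simp

-- ===== VERDICT (by name: the statement is the Claim_ definition above) =====
theorem compare_events_spec : Claim_equal_compare_events := by
  intro events ground_truth tol _dom
  unfold Spec_compare_events compare_events compare_events_alt
  rw [pvDet0_eq]
  have hgt : (PySem.List.sorted ground_truth (fun x => x) false).Pairwise (· ≤ ·) :=
    PySem.List.sorted_pairwise ground_truth (fun x => x)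
  have hdet : (PySem.List.sorted (events.foldl (fun acc (e : Int × Int × Int) => acc ++ List.replicate e.2.1.toNat e.1) []) (fun x => x) false).Pairwise (· ≤ ·) :=
    PySem.List.sorted_pairwise _ (fun x => x)
  have hinv : pvInvL (PySem.List.sorted ground_truth (fun x => x) false) [] [] 0 [] := by
    refine ⟨Nat.zero_le _, ?_, rfl, by simp⟩
    simp [pvU, PySem.Set.contains]
  obtain ⟨h1, ⟨Q, hQ⟩, h3, _h4⟩ :=
    pvMain (PySem.List.sorted ground_truth (fun x => x) false) tol hgt
      (PySem.List.sorted (events.foldl (fun acc (e : Int × Int × Int) => acc ++ List.replicate e.2.1.toNat e.1) []) (fun x => x) false)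
      0 [] [] [] 0 0 [] [] hdet hinv (by simp) (by simp) (by simp)
  obtain ⟨hle, hU, hsnd, _⟩ := hQ
  refine Prod.ext ?_ (Prod.ext ?_ ?_)
  · exact h1
  · show ((PySem.List.pyRange 0 _ 1).filter _).map _ = _
    rw [pvRangeFilterMap]
    show ((pvU _ _).map (·.2)) = _
    rw [hU, List.map_append, hsnd, PySem.List.map_snd_enumerate]
  · show ((PySem.List.pyRange 0 _ 1).filter _).map _ = _
    rw [pvRangeFilterMap]
    show ((pvU _ _).map (·.2)) = _
    rw [h3]
    simp [pvU]
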